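-- pv_equiv track=rewrite | github.com/slemdem/Baekjoon | 프로그래머스/2/42587. 프로세스/프로세스.py | solution
-- ===== SOURCE A (Python) =====
-- from collections import deque
--
-- def solution(priorities, location):
--     cnt = 0
--     locationval = priorities[location]
--     priorities = deque(priorities)
--     locationque = [0 for _ in range(len(priorities))]
--     locationque[location] = 1
--
--     while priorities:
--         m = max(priorities)
--         for i in range(len(priorities)):
--             j = priorities.popleft()
--             if j == m:
--                 if locationque[0] == 1:
--                     return cnt+1
--                 del locationque[0]
--                 break
--             else:
--                 priorities.append(j)
--                 locationque.append(locationque[0])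
--                 del locationque[0]
--         cnt+=1
-- ===== SOURCE B (Python) =====
-- from collections import deque
--
-- def solution(priorities, location):
--     # One queue of (original_index, priority); current max read off a pre-sorted list.
--     order = sorted(priorities)            # ascending: current max is order[-1]
--     q = deque(enumerate(priorities))
--     cnt = 0
--     while q:
--         i, p = q.popleft()
--         if p == order[-1]:
--             order.pop()
--             cnt += 1
--             if i == location:
--                 return cnt
--         else:
--             q.append((i, p))
-- ===== Notes on version B (the rewrite author's own statement) =====
-- stated objective: simpler
-- what changed: B carries one deque of (original_index, priority) pairs built by enumerate and reads the current maximum off a list sorted once up front, replacing A's parallel 0/1 marker array and the max() rescan of the whole queue at every round.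
-- outside the precondition, e.g. on solution([1, 2, 3], -1): A returns 1, B returns None; on solution([], 0): A raises IndexError, B returns None
import Mathlib
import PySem

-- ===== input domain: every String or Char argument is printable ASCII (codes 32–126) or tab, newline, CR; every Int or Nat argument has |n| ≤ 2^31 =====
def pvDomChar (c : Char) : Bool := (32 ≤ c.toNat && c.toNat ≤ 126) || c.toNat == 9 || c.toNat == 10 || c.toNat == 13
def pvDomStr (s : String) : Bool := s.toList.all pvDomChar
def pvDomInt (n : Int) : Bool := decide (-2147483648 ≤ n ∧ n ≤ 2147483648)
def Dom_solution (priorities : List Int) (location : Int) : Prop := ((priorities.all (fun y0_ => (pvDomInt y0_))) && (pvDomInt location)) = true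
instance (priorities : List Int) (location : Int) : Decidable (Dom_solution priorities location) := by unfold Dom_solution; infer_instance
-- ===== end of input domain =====

-- B replaces A's parallel 0/1 marker array and per-round max() rescan by one queue of
-- (original_index, priority) pairs plus a list sorted once up front (objective: simpler).

-- ===== PORT A =====
-- inner 'for i in range(len(priorities))' loop: fuel = remaining iterations; state (queue, locationque, cnt).
-- result: (some r, _, _) = 'return r' fired; (none, q', lq') = loop left by break (or fuel ran out: loop ended).
-- lq is always the same length as q, so the head-matching default branch is never taken on reachable states.
def solInnerA (m : Int) (cnt : Int) : Nat → List Int → List Int → (Option Int × List Int × List Int)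
  | 0, q, lq => (none, q, lq)
  | Nat.succ k, q, lq =>
    match q, lq with
    | j :: qs, h :: t =>
      if j = m then
        if h = 1 then (some (cnt + 1), qs, t)      -- 'return cnt+1'
        else (none, qs, t)                          -- 'del locationque[0]; break'
      else solInnerA m cnt k (qs ++ [j]) (t ++ [h]) -- rotate both queues
    | _, _ => (none, q, lq)

-- outer 'while priorities' loop; fuel = initial length (each round removes exactly one element);
-- the 0 on exhausted fuel / empty queue mirrors Python's fall-through 'return None', unreachable under Pre_.
def solOuterA : Nat → List Int → List Int → Int → Int
  | 0, _, _, _ => 0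
  | Nat.succ f, q, lq, cnt =>
    match q with
    | [] => 0
    | _ =>
      let m := (PySem.List.max? q (fun x => x)).getD 0   -- m = max(priorities)
      match solInnerA m cnt q.length q lq with
      | (some r, _, _) => r
      | (none, q', lq') => solOuterA f q' lq' (cnt + 1)

def solution (priorities : List Int) (location : Int) : Int :=
  match PySem.List.pyGet? priorities location with       -- locationval = priorities[location] (IndexError → Pre_)
  | none => 0
  | some _ =>
    -- locationque = [0]*len; locationque[location] = 1 (Python wraps a negative in-range index)
    let idx := if location < 0 then location + priorities.length else location
    let lq := (List.replicate priorities.length (0 : Int)).set idx.toNat 1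
    solOuterA priorities.length priorities lq 0

-- ===== PORT B =====
-- single 'while q' loop of Source B; fuel bounds the iteration count (while-guard; ample under Pre_),
-- and the 0 on exhausted fuel / empty queue mirrors the fall-through 'return None', unreachable under Pre_.
def solLoopB (location : Int) : Nat → List (Int × Int) → List Int → Int → Int
  | 0, _, _, _ => 0
  | Nat.succ f, q, order, cnt =>
    match q with
    | [] => 0
    | (i, p) :: qs =>
      if p = order.getLast?.getD 0 then                  -- p == order[-1] (order never empty while q isn't)
        if i = location then cnt + 1                     -- cnt += 1; return cnt
        else solLoopB location f qs order.dropLast (cnt + 1)   -- order.pop(); cnt += 1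
      else solLoopB location f (qs ++ [(i, p)]) order cnt      -- q.append((i, p))

def solution_alt (priorities : List Int) (location : Int) : Int :=
  let order := PySem.List.sorted priorities (fun x => x) false   -- order = sorted(priorities)
  let q := PySem.List.enumerate priorities                        -- q = deque(enumerate(priorities))
  solLoopB location ((priorities.length + 1) * (priorities.length + 1)) q order 0

-- ===== PRECONDITION & SPEC =====
-- Pre_ restricts to the task's natural domain 0 ≤ location < len(priorities): A raises IndexError on
-- locations out of range -len..len-1 and accepts negative ones only through Python's index wraparound
-- (a corner no statement of the task specifies; B's index tracking returns None there).
def Pre_solution (priorities : List Int) (location : Int) : Prop :=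
  0 ≤ location ∧ location < priorities.length
instance (priorities : List Int) (location : Int) : Decidable (Pre_solution priorities location) := by
  unfold Pre_solution; infer_instance
def pvWitness_solution : List Int × Int := ([2, 1, 3, 2], 2)

def Spec_solution (priorities : List Int) (location : Int) (out : Int) : Prop := out = solution_alt priorities location
instance (priorities : List Int) (location : Int) (out : Int) : Decidable (Spec_solution priorities location out) := by unfold Spec_solution; infer_instance

-- ===== CLAIM (what is proved, stated in full; the proofs are below) =====
def Claim_equal_solution : Prop := ∀ (priorities : List Int) (location : Int), Dom_solution priorities location → Pre_solution priorities location → Spec_solution priorities location (solution priorities location)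

-- ===== LEMMAS AND PROOFS =====

-- the marker value A's locationque carries for the document an index/priority pair denotes
def pvMarker (location : Int) (x : Int × Int) : Int := if x.1 = location then 1 else 0

theorem solOuterA_nil (fA : Nat) (lq : List Int) (cnt : Int) : solOuterA fA [] lq cnt = 0 := by
  cases fA <;> simp [solOuterA]

theorem solLoopB_nil (location : Int) (fB : Nat) (order : List Int) (cnt : Int) :
    solLoopB location fB [] order cnt = 0 := by
  cases fB <;> simp [solLoopB]

-- first-occurrence split of a member
theorem first_occ_split (q : List Int) (M : Int) (h : M ∈ q) :
    ∃ as bs, q = as ++ M :: bs ∧ ∀ a ∈ as, a ≠ M := by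
  induction q with
  | nil => cases h
  | cons x xs ih =>
    by_cases hx : x = M
    · exact ⟨[], xs, by simp [hx], by simp⟩
    · obtain ⟨as, bs, rfl, has⟩ := ih (by cases h with
        | head => exact absurd rfl hx
        | tail _ h => exact h)
      exact ⟨x :: as, bs, rfl, by simpa [hx] using has⟩

-- one round of A's inner for-loop: rotate past the first occurrence of m, then return/break
theorem solInnerA_round (m cnt : Int) :
    ∀ (as : List Int) (k : Nat) (bs cs : List Int) (h : Int) (ds : List Int),
      (∀ a ∈ as, a ≠ m) → cs.length = as.length → as.length + 1 ≤ k →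
      solInnerA m cnt k (as ++ m :: bs) (cs ++ h :: ds)
        = ((if h = 1 then some (cnt + 1) else none), bs ++ as, ds ++ cs) := by
  intro as
  induction as with
  | nil =>
    intro k bs cs h ds _ hlen hk
    obtain ⟨k', rfl⟩ : ∃ k', k = k' + 1 := ⟨k - 1, by omega⟩
    rw [List.length_eq_zero_iff.mp hlen]
    by_cases hh : h = 1 <;> simp [solInnerA, hh]
  | cons a as ih =>
    intro k bs cs h ds hne hlen hk
    obtain ⟨k', rfl⟩ : ∃ k', k = k' + 1 := ⟨k - 1, by omega⟩
    obtain ⟨c, cs', rfl⟩ : ∃ c cs', cs = c :: cs' := by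
      cases cs with
      | nil => simp at hlen
      | cons c cs' => exact ⟨c, cs', rfl⟩
    have ha : a ≠ m := hne a (by simp)
    have h1 : (as ++ m :: bs) ++ [a] = as ++ m :: (bs ++ [a]) := by simp
    have h2 : (cs' ++ h :: ds) ++ [c] = cs' ++ h :: (ds ++ [c]) := by simp
    simp only [solInnerA, List.cons_append, if_neg ha, h1, h2]
    rw [ih k' (bs ++ [a]) cs' h (ds ++ [c]) (fun x hx => hne x (by simp [hx]))
        (by simpa using hlen) (by simp at hk ⊢; omega)]
    simp

-- unfolding lemma for one step of B's loop
theorem solLoopB_cons (location : Int) (f : Nat) (i p : Int) (qs : List (Int × Int))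
    (order : List Int) (cnt : Int) :
    solLoopB location (f + 1) ((i, p) :: qs) order cnt
      = if p = order.getLast?.getD 0 then
          (if i = location then cnt + 1 else solLoopB location f qs order.dropLast (cnt + 1))
        else solLoopB location f (qs ++ [(i, p)]) order cnt := rfl

-- one round of B's loop: rotate past the first pair carrying the current maximum
theorem solLoopB_round (location m : Int) :
    ∀ (asB : List (Int × Int)) (fB : Nat) (bsB : List (Int × Int)) (i : Int) (order : List Int) (cnt : Int),
      (∀ x ∈ asB, x.2 ≠ m) → order.getLast?.getD 0 = m →
      solLoopB location (fB + (asB.length + 1)) (asB ++ (i, m) :: bsB) order cnt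
        = if i = location then cnt + 1
          else solLoopB location fB (bsB ++ asB) order.dropLast (cnt + 1) := by
  intro asB
  induction asB with
  | nil =>
    intro fB bsB i order cnt _ hlast
    simp only [List.nil_append, List.length_nil, Nat.zero_add, solLoopB_cons, hlast,
      List.append_nil]
    simp
  | cons x asB ih =>
    intro fB bsB i order cnt hne hlast
    obtain ⟨xi, xp⟩ := x
    have hx : xp ≠ m := hne (xi, xp) (by simp)
    have h1 : (asB ++ (i, m) :: bsB) ++ [(xi, xp)] = asB ++ (i, m) :: (bsB ++ [(xi, xp)]) := by simp
    rw [List.length_cons, show fB + (asB.length + 1 + 1) = (fB + (asB.length + 1)) + 1 from by omega,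
        List.cons_append, solLoopB_cons, hlast, if_neg hx, h1,
        ih fB (bsB ++ [(xi, xp)]) i order cnt (fun y hy => hne y (by simp [hy])) hlast]
    simp

-- the last element of the sorted companion list is Python's max of the queue
theorem getLast_eq_max (order q : List Int) (M : Int) (hq : q ≠ [])
    (hperm : order.Perm q) (hsort : order.Pairwise (· ≤ ·))
    (hM : PySem.List.max? q (fun x => x) = some M) :
    order.getLast?.getD 0 = M := by
  have horder : order ≠ [] := by
    intro h; subst h; exact hq hperm.nil_eq.symm
  rw [List.getLast?_eq_some_getLast horder]
  have hmem : order.getLast horder ∈ q := hperm.mem_iff.mp (List.getLast_mem horder)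
  have hle : order.getLast horder ≤ M := by
    simpa using PySem.List.max?_isMax hM _ hmem
  have hMmem : M ∈ order := hperm.mem_iff.mpr (PySem.List.max?_mem hM)
  have hge : M ≤ order.getLast horder := by
    have hsplit := List.dropLast_append_getLast horder
    have hp : (order.dropLast ++ [order.getLast horder]).Pairwise (fun a b : Int => a ≤ b) := by
      rw [hsplit]; exact hsort
    rw [← hsplit] at hMmem
    rcases List.mem_append.mp hMmem with hM1 | hM2
    · exact ((List.pairwise_append.mp hp).2.2 M hM1 _ (by simp))
    · simp at hM2; omega
  simp; omega

-- nonlinear fuel bookkeeping for one removed element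
theorem fuel_step (t a fB : Nat) (h1 : a ≤ t) (h2 : (t + 1) * (t + 1) + (t + 1) ≤ fB) :
    t * t + t + (a + 1) ≤ fB := by nlinarith

-- unfolding lemma for one outer round of A (nonempty queue)
theorem solOuterA_cons (f : Nat) (x : Int) (qs lq : List Int) (cnt : Int) :
    solOuterA (f + 1) (x :: qs) lq cnt
      = match solInnerA ((PySem.List.max? (x :: qs) (fun y => y)).getD 0) cnt
            (x :: qs).length (x :: qs) lq with
        | (some r, _, _) => r
        | (none, q', lq') => solOuterA f q' lq' (cnt + 1) := rfl

-- main simulation: A's two nested loops and B's single loop compute the same value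
theorem main_loop (location : Int) :
    ∀ (fA : Nat) (qB : List (Int × Int)) (order : List Int) (cnt : Int) (fB : Nat),
      qB.length ≤ fA → qB.length * qB.length + qB.length ≤ fB →
      order.Perm (qB.map Prod.snd) → order.Pairwise (· ≤ ·) →
      solOuterA fA (qB.map Prod.snd) (qB.map (pvMarker location)) cnt
        = solLoopB location fB qB order cnt := by
  intro fA
  induction fA with
  | zero =>
    intro qB order cnt fB hA _ _ _
    have : qB = [] := by
      cases qB with
      | nil => rfl
      | cons x xs => simp at hA
    subst this
    simp [solOuterA, solLoopB_nil]
  | succ f ih =>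
    intro qB order cnt fB hA hB hperm hsort
    cases hqB : qB with
    | nil => subst hqB; simp [solOuterA_nil, solLoopB_nil]
    | cons x0 qB' =>
    subst hqB
    set q : List Int := (x0 :: qB').map Prod.snd with hq
    have hqne : q ≠ [] := by simp [hq]
    -- the max of the queue
    obtain ⟨M, hM⟩ : ∃ M, PySem.List.max? q (fun x => x) = some M := by
      cases hmx : PySem.List.max? q (fun x => x) with
      | none => exact absurd ((PySem.List.max?_eq_none_iff _ _).mp hmx) hqne
      | some M => exact ⟨M, rfl⟩
    have hMgetD : (PySem.List.max? q (fun x => x)).getD 0 = M := by rw [hM]; rfl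
    have hlast : order.getLast?.getD 0 = M := getLast_eq_max order q M hqne hperm hsort hM
    -- split the queue at the first occurrence of M
    obtain ⟨as, bs, hsplit, hnot⟩ := first_occ_split q M (PySem.List.max?_mem hM)
    obtain ⟨asB, rest, hqB2, hasB, hrest⟩ := List.map_eq_append_iff.mp hsplit
    obtain ⟨xi, bsB, hrest2, hxi, hbsB⟩ := List.map_eq_cons_iff.mp hrest
    obtain ⟨i, p⟩ := xi
    have hMp : M = p := hxi.symm
    subst hMp
    subst hrest2
    -- A's side: one outer round
    have hlenq : q.length = as.length + 1 + bs.length := by simp [hsplit]; omega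
    have hcs : (asB.map (pvMarker location)).length = as.length := by
      simp [← hasB]
    have hmap2 : (x0 :: qB').map (pvMarker location)
        = asB.map (pvMarker location) ++ pvMarker location (i, M) :: bsB.map (pvMarker location) := by
      rw [hqB2]; simp
    have hA1 : solOuterA (f + 1) q ((x0 :: qB').map (pvMarker location)) cnt
        = match solInnerA M cnt q.length q ((x0 :: qB').map (pvMarker location)) with
          | (some r, _, _) => r
          | (none, q', lq') => solOuterA f q' lq' (cnt + 1) := by
      have hq' : q = x0.2 :: qB'.map Prod.snd := by simp [hq]
      rw [hq', solOuterA_cons, ← hq', hMgetD]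
    rw [hmap2] at hA1
    rw [hsplit] at hA1
    rw [solInnerA_round M cnt as (as ++ M :: bs).length bs (asB.map (pvMarker location))
        (pvMarker location (i, M)) (bsB.map (pvMarker location)) hnot hcs (by simp)] at hA1
    -- B's side: one round
    have hlenB : (x0 :: qB').length = asB.length + 1 + bsB.length := by
      rw [hqB2]; simp; omega
    have hasBlen : asB.length = as.length := by rw [← hasB]; simp
    obtain ⟨fB', hfB'⟩ : ∃ fB', fB = fB' + (asB.length + 1) := by
      refine ⟨fB - (asB.length + 1), ?_⟩
      have : asB.length + 1 ≤ fB := by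
        have h1 : asB.length + 1 ≤ (x0 :: qB').length := by omega
        have h2 : (x0 :: qB').length ≤ fB := by
          have := hB; nlinarith [hlenB]
        omega
      omega
    have hB1 : solLoopB location fB (x0 :: qB') order cnt
        = if i = location then cnt + 1
          else solLoopB location fB' (bsB ++ asB) order.dropLast (cnt + 1) := by
      conv_lhs => rw [hqB2, hfB']
      exact solLoopB_round location M asB fB' bsB i order cnt
        (fun x hx => by
          intro hx2
          exact hnot x.2 (by rw [← hasB]; exact List.mem_map_of_mem hx) hx2) hlast
    rw [hB1]
    rw [hsplit, hmap2]
    by_cases hiloc : i = location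
    · -- the target document is printed this round: both return cnt+1
      rw [hA1]
      simp [pvMarker, hiloc]
    · -- some other document is printed: recurse
      rw [hA1]
      have hmark0 : pvMarker location (i, M) = 0 := by simp [pvMarker, hiloc]
      simp only [hmark0, if_neg hiloc]
      norm_num
      have hmapsnd : (bsB ++ asB).map Prod.snd = bs ++ as := by
        simp [← hbsB, ← hasB]
      have hmapmark : bsB.map (pvMarker location) ++ asB.map (pvMarker location)
          = (bsB ++ asB).map (pvMarker location) := by simp
      rw [hmapmark, ← hmapsnd]
      apply ih
      · have : (bsB ++ asB).length = (x0 :: qB').length - 1 := by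
          rw [hlenB]; simp; omega
        omega
      · -- fuel bookkeeping
        have hlen1 : (bsB ++ asB).length + 1 = (x0 :: qB').length := by
          rw [hlenB]; simp; omega
        set t := (bsB ++ asB).length with ht
        have hfb2 : (t + 1) * (t + 1) + (t + 1) ≤ fB := by rw [hlen1]; exact hB
        have : asB.length ≤ t := by simp [ht]
        have := fuel_step t asB.length fB this hfb2
        omega
      · -- the sorted companion stays a sorted permutation after popping its last element
        rw [hmapsnd]
        have horder : order ≠ [] := by
          intro h; subst h; exact hqne hperm.nil_eq.symm
        have hgl : order.getLast horder = M := by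
          have := hlast
          rw [List.getLast?_eq_some_getLast horder] at this
          simpa using this
        have hsplit2 : order.dropLast ++ [M] = order := by
          rw [← hgl]; exact List.dropLast_append_getLast horder
        have hp1 : (order.dropLast ++ [M]).Perm (M :: order.dropLast) :=
          List.perm_append_singleton M order.dropLast
        have hordperm : order.Perm (M :: (as ++ bs)) := by
          rw [hsplit] at hperm
          exact hperm.trans List.perm_middle
        have h4 : (M :: order.dropLast).Perm order := by
          conv_rhs => rw [← hsplit2]
          exact hp1.symm
        have hp3 : order.dropLast.Perm (as ++ bs) := (h4.trans hordperm).cons_inv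
        exact hp3.trans List.perm_append_comm
      · exact List.Pairwise.sublist (order.dropLast_sublist) hsort

-- initial marker array = the markers read off the enumerated queue
theorem init_markers (priorities : List Int) (location : Int)
    (h0 : 0 ≤ location) (_h1 : location < priorities.length) :
    (List.replicate priorities.length (0 : Int)).set location.toNat 1
      = (PySem.List.enumerate priorities).map (pvMarker location) := by
  apply List.ext_getElem
  · simp [PySem.List.length_enumerate]
  · intro k hk1 hk2
    have hk : k < priorities.length := by simpa using hk1
    rw [List.getElem_set]
    rw [List.getElem_map]
    rw [PySem.List.getElem_enumerate]
    simp only [pvMarker]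
    have hiff : (location.toNat = k) ↔ ((0 : Int) + (k : Int) = location) := by omega
    by_cases hcase : location.toNat = k
    · simp [hcase, hiff.mp hcase]
    · have h2 : ¬((k : Int) = location) := by omega
      simp [hcase, h2, List.getElem_replicate]

-- ===== VERDICT (by name: the statement is the Claim_ definition above) =====
theorem solution_spec : Claim_equal_solution := by
  intro priorities location _ hpre
  obtain ⟨h0, h1⟩ := hpre
  unfold Spec_solution solution solution_alt
  -- priorities[location] succeeds under Pre_
  have hget : ∃ v, PySem.List.pyGet? priorities location = some v := by
    have hnat : location = ((location.toNat : Nat) : Int) := by omega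
    rw [hnat, PySem.List.pyGet?_natCast]
    exact ⟨priorities[location.toNat], by
      rw [List.getElem?_eq_getElem (by omega)]⟩
  obtain ⟨v, hv⟩ := hget
  rw [hv]
  simp only
  rw [if_neg (by omega : ¬ location < 0)]
  rw [init_markers priorities location h0 h1]
  have hsnd : (PySem.List.enumerate priorities).map Prod.snd = priorities := by
    exact PySem.List.map_snd_enumerate priorities 0
  have key := main_loop location priorities.length (PySem.List.enumerate priorities)
      (PySem.List.sorted priorities (fun x => x) false) 0
      ((priorities.length + 1) * (priorities.length + 1))
      (by simp [PySem.List.length_enumerate])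
      (by simp only [PySem.List.length_enumerate]; nlinarith)
      (by rw [hsnd]; exact PySem.List.sorted_perm priorities (fun x => x) false)
      (by simpa using PySem.List.sorted_pairwise priorities (fun x => x))
  rw [hsnd] at key
  exact key
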